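-- pv_equiv track=rewrite | github.com/jeb-barker/Artificial-Intelligence-Unit-2 | Barker_J_U2_L4.py | sudoku_neighbors
-- ===== SOURCE A (Python) =====
-- def sudoku_neighbors(csp_table):
--     # each position p has its neighbors {p:[positions in same row/col/subblock], ...}
--     out = {x: set() for x in range(0,81)}
--     for index in range(0, 81):
--         for box in csp_table:
--             if index in box:
--                 for xdex in box:
--                     if xdex != index:
--                         out[index].add(xdex)
--     return out
-- ===== SOURCE B (Python) =====
-- def sudoku_neighbors(csp_table):
--     # Index the boxes by member once; each position's neighbor set is then the
--     # union of its own boxes (minus itself) -- no per-position membership scans.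
--     boxes_of = {}
--     for box in csp_table:
--         for i in box:
--             if 0 <= i < 81:
--                 boxes_of.setdefault(i, []).append(box)
--     out = {}
--     for i in range(81):
--         s = set()
--         for box in boxes_of.get(i, []):
--             s.update(box)
--         s.discard(i)
--         out[i] = s
--     return out
-- ===== Notes on version B (the rewrite author's own statement) =====
-- stated objective: faster
-- what changed: Instead of scanning every box for each of the 81 positions with a per-position membership test (A), B indexes the boxes by member in one pass and then forms each position's neighbor set as the union of its own boxes minus itself.
import Mathlib
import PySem

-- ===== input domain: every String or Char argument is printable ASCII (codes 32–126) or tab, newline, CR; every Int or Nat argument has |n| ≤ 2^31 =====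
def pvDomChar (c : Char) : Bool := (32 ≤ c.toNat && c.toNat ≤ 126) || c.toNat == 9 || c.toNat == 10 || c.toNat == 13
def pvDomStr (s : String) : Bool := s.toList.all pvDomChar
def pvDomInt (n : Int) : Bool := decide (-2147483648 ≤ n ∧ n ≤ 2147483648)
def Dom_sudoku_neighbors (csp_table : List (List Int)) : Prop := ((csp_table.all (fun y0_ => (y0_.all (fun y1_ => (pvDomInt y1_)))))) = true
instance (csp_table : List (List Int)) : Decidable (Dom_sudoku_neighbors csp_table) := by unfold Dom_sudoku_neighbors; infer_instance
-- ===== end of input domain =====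

-- B indexes the boxes by member once and unions each position's own boxes (minus itself),
-- replacing A's per-position scan of all boxes; objective: faster (measured).

-- ===== PORT A =====
def sudoku_neighbors (csp_table : List (List Int)) : List (Int × List Int) :=
  -- out = {x: set() for x in range(0, 81)}
  let out : PySem.Dict Int (PySem.Set Int) :=
    (PySem.List.pyRange 0 81 1).foldl (fun d x => d.insert x PySem.Set.empty) PySem.Dict.empty
  -- for index in range(0, 81): for box in csp_table: if index in box:
  --   for xdex in box: if xdex != index: out[index].add(xdex)
  let out := (PySem.List.pyRange 0 81 1).foldl (fun d index =>
      csp_table.foldl (fun d box =>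
        if index ∈ box then
          box.foldl (fun d xdex =>
            if xdex ≠ index then
              d.modify index PySem.Set.empty (fun s => s.add xdex)
            else d) d
        else d) d) out
  out.items

-- ===== PORT B =====
-- B: index the boxes by member once, then each position's neighbor set is the
-- union of its own boxes minus itself.
def sudoku_neighbors_alt (csp_table : List (List Int)) : List (Int × List Int) :=
  -- for box in csp_table: for i in box: if 0 <= i < 81: boxes_of.setdefault(i, []).append(box)
  let boxes_of : PySem.Dict Int (List (List Int)) :=
    csp_table.foldl (fun d box =>
      box.foldl (fun d i =>
        if 0 ≤ i ∧ i < 81 then d.modify i [] (fun bs => bs ++ [box]) else d) d)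
      PySem.Dict.empty
  -- for i in range(81): s = set(); for box in boxes_of.get(i, []): s.update(box)
  --                     s.discard(i); out[i] = s
  let out : PySem.Dict Int (PySem.Set Int) :=
    (PySem.List.pyRange 0 81 1).foldl (fun t i =>
      let s := (boxes_of.getD i []).foldl (fun s box => PySem.Set.update s box) PySem.Set.empty
      t.insert i (PySem.Set.discard s i)) PySem.Dict.empty
  out.items

-- ===== PRECONDITION & SPEC =====
def Spec_sudoku_neighbors (csp_table : List (List Int)) (out : List (Int × List Int)) : Prop := out = sudoku_neighbors_alt csp_table
instance (csp_table : List (List Int)) (out : List (Int × List Int)) : Decidable (Spec_sudoku_neighbors csp_table out) := by unfold Spec_sudoku_neighbors; infer_instance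

-- ===== CLAIM (what is proved, stated in full; the proofs are below) =====
def Claim_equal_sudoku_neighbors : Prop := ∀ (csp_table : List (List Int)), Dom_sudoku_neighbors csp_table → Spec_sudoku_neighbors csp_table (sudoku_neighbors csp_table)

-- ===== LEMMAS AND PROOFS =====

-- proof-side abbreviations
def pvAddAll (s : PySem.Set Int) (box : List Int) (i : Int) : PySem.Set Int :=
  box.foldl (fun s x => if x ≠ i then s.add x else s) s

def pvAddFold (box : List Int) (d : PySem.Dict Int (PySem.Set Int)) (i : Int) :
    PySem.Dict Int (PySem.Set Int) :=
  box.foldl (fun d x =>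
    if x ≠ i then d.modify i PySem.Set.empty (fun s => s.add x) else d) d

def pvVal (boxes : List (List Int)) (k : Int) (s : PySem.Set Int) : PySem.Set Int :=
  boxes.foldl (fun s box => if k ∈ box then pvAddAll s box k else s) s

def pvStepA (boxes : List (List Int)) (d : PySem.Dict Int (PySem.Set Int)) (i : Int) :
    PySem.Dict Int (PySem.Set Int) :=
  boxes.foldl (fun d box => if i ∈ box then pvAddFold box d i else d) d

-- ---- pvAddAll facts ----
theorem pvAddAll_mem (box : List Int) (i x : Int) (s : PySem.Set Int)
    (h : x ∈ s) : x ∈ pvAddAll s box i := by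
  induction box generalizing s with
  | nil => exact h
  | cons b bs ih =>
    simp only [pvAddAll, List.foldl_cons] at *
    split
    · exact ih _ ((PySem.Set.mem_add s b x).mpr (Or.inl h))
    · exact ih _ h

theorem pvAddAll_mem_self (box : List Int) (i x : Int) (s : PySem.Set Int)
    (hx : x ∈ box) (hxi : x ≠ i) : x ∈ pvAddAll s box i := by
  induction box generalizing s with
  | nil => cases hx
  | cons b bs ih =>
    simp only [pvAddAll, List.foldl_cons]
    rcases List.mem_cons.mp hx with rfl | hmem
    · simp only [if_pos hxi]
      exact pvAddAll_mem bs i x _ ((PySem.Set.mem_add s x x).mpr (Or.inr rfl))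
    · split
      · exact ih _ hmem
      · exact ih _ hmem

theorem pvAddAll_of_mem (box : List Int) (i : Int) (s : PySem.Set Int)
    (h : ∀ x ∈ box, x ≠ i → x ∈ s) : pvAddAll s box i = s := by
  induction box with
  | nil => rfl
  | cons b bs ih =>
    simp only [pvAddAll, List.foldl_cons]
    by_cases hb : b ≠ i
    · have hmem : b ∈ s := h b (List.mem_cons_self) hb
      rw [if_pos hb]
      have : s.add b = s := by
        simp [PySem.Set.add, PySem.Set.contains, List.contains_eq_mem, hmem]
      rw [this]
      exact ih (fun x hx hxi => h x (List.mem_cons_of_mem _ hx) hxi)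
    · rw [if_neg hb]
      exact ih (fun x hx hxi => h x (List.mem_cons_of_mem _ hx) hxi)

theorem pvAddAll_idem (box : List Int) (i : Int) (s : PySem.Set Int) :
    pvAddAll (pvAddAll s box i) box i = pvAddAll s box i :=
  pvAddAll_of_mem box i _ (fun x hx hxi => pvAddAll_mem_self box i x s hx hxi)

-- ---- pvAddFold facts (A side) ----
theorem getD_pvAddFold (box : List Int) (d : PySem.Dict Int (PySem.Set Int)) (i k : Int) :
    (pvAddFold box d i).getD k PySem.Set.empty =
      if k = i then pvAddAll (d.getD i PySem.Set.empty) box i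
      else d.getD k PySem.Set.empty := by
  induction box generalizing d with
  | nil =>
    simp only [pvAddFold, pvAddAll, List.foldl_nil]
    by_cases hk : k = i <;> simp [hk]
  | cons b bs ih =>
    simp only [pvAddFold, pvAddAll, List.foldl_cons] at *
    by_cases hb : b ≠ i
    · rw [if_pos hb, ih]
      by_cases hk : k = i <;> simp [PySem.Dict.getD_modify, hk, hb]
    · rw [if_neg hb, ih]
      simp [hb]

theorem contains_pvAddFold (box : List Int) (d : PySem.Dict Int (PySem.Set Int)) (i k : Int)
    (h : d.contains i = true) : (pvAddFold box d i).contains k = d.contains k := by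
  induction box generalizing d with
  | nil => rfl
  | cons b bs ih =>
    simp only [pvAddFold, List.foldl_cons] at *
    by_cases hb : b ≠ i
    · rw [if_pos hb, ih _ (by simp [PySem.Dict.contains_modify])]
      by_cases hk : k = i <;> simp [PySem.Dict.contains_modify, hk, h]
    · rw [if_neg hb, ih _ h]

theorem keys_pvAddFold (box : List Int) (d : PySem.Dict Int (PySem.Set Int)) (i : Int)
    (h : d.contains i = true) : (pvAddFold box d i).keys = d.keys := by
  induction box generalizing d with
  | nil => rfl
  | cons b bs ih =>
    simp only [pvAddFold, List.foldl_cons] at *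
    by_cases hb : b ≠ i
    · rw [if_pos hb, ih _ (by simp [PySem.Dict.contains_modify]),
        PySem.Dict.keys_modify, PySem.Dict.keys_insert_of_contains _ _ h]
    · rw [if_neg hb, ih _ h]

-- ---- A outer body ----
theorem getD_pvStepA (boxes : List (List Int)) (d : PySem.Dict Int (PySem.Set Int)) (i k : Int)
    (h : d.contains i = true) :
    (pvStepA boxes d i).getD k PySem.Set.empty =
      if k = i then pvVal boxes i (d.getD i PySem.Set.empty)
      else d.getD k PySem.Set.empty := by
  induction boxes generalizing d with
  | nil =>
    simp only [pvStepA, pvVal, List.foldl_nil]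
    by_cases hk : k = i <;> simp [hk]
  | cons box bs ih =>
    simp only [pvStepA, pvVal, List.foldl_cons] at *
    by_cases hm : i ∈ box
    · rw [if_pos hm, ih _ (by rw [contains_pvAddFold _ _ _ _ h]; exact h)]
      simp only [getD_pvAddFold]
      by_cases hk : k = i <;> simp [hk, hm]
    · rw [if_neg hm, ih _ h]
      by_cases hk : k = i <;> simp [hk, hm]

theorem contains_pvStepA (boxes : List (List Int)) (d : PySem.Dict Int (PySem.Set Int)) (i k : Int)
    (h : d.contains i = true) : (pvStepA boxes d i).contains k = d.contains k := by
  induction boxes generalizing d with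
  | nil => rfl
  | cons box bs ih =>
    simp only [pvStepA, List.foldl_cons] at *
    by_cases hm : i ∈ box
    · rw [if_pos hm, ih _ (by rw [contains_pvAddFold _ _ _ _ h]; exact h),
        contains_pvAddFold _ _ _ _ h]
    · rw [if_neg hm, ih _ h]

theorem keys_pvStepA (boxes : List (List Int)) (d : PySem.Dict Int (PySem.Set Int)) (i : Int)
    (h : d.contains i = true) : (pvStepA boxes d i).keys = d.keys := by
  induction boxes generalizing d with
  | nil => rfl
  | cons box bs ih =>
    simp only [pvStepA, List.foldl_cons] at *
    by_cases hm : i ∈ box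
    · rw [if_pos hm, ih _ (by rw [contains_pvAddFold _ _ _ _ h]; exact h),
        keys_pvAddFold _ _ _ h]
    · rw [if_neg hm, ih _ h]

-- ---- A full index loop (over a Nodup index list) ----
theorem getD_foldA (l : List Int) (boxes : List (List Int)) (d : PySem.Dict Int (PySem.Set Int))
    (k : Int) (hnd : l.Nodup) (hc : ∀ j ∈ l, d.contains j = true) :
    (l.foldl (pvStepA boxes) d).getD k PySem.Set.empty =
      if k ∈ l then pvVal boxes k (d.getD k PySem.Set.empty)
      else d.getD k PySem.Set.empty := by
  induction l generalizing d with
  | nil => simp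
  | cons i l ih =>
    simp only [List.foldl_cons]
    have hci : d.contains i = true := hc i List.mem_cons_self
    have hc' : ∀ j ∈ l, (pvStepA boxes d i).contains j = true := by
      intro j hj; rw [contains_pvStepA _ _ _ _ hci]; exact hc j (List.mem_cons_of_mem _ hj)
    rw [ih _ (List.nodup_cons.mp hnd).2 hc']
    by_cases hk : k = i
    · subst hk
      have hkl : k ∉ l := (List.nodup_cons.mp hnd).1
      rw [getD_pvStepA _ _ _ _ hci]
      simp [hkl]
    · by_cases hkl : k ∈ l <;>
        · rw [getD_pvStepA _ _ _ _ hci]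
          simp [hkl, hk, List.mem_cons]

theorem keys_foldA (l : List Int) (boxes : List (List Int)) (d : PySem.Dict Int (PySem.Set Int))
    (hc : ∀ j ∈ l, d.contains j = true) :
    (l.foldl (pvStepA boxes) d).keys = d.keys := by
  induction l generalizing d with
  | nil => rfl
  | cons i l ih =>
    have hci : d.contains i = true := hc i List.mem_cons_self
    simp only [List.foldl_cons]
    rw [ih _ (fun j hj => by
      rw [contains_pvStepA _ _ _ _ hci]; exact hc j (List.mem_cons_of_mem _ hj)),
      keys_pvStepA _ _ _ hci]

-- ---- the initial dict of A ----
def pvInit : PySem.Dict Int (PySem.Set Int) :=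
  (PySem.List.pyRange 0 81 1).foldl (fun d x => d.insert x PySem.Set.empty) PySem.Dict.empty

theorem keys_pvInit : pvInit.keys = PySem.List.pyRange 0 81 1 := by
  have h := PySem.Dict.keys_foldl_insert (PySem.List.pyRange 0 81 1)
    (fun (_ : PySem.Dict Int (PySem.Set Int)) (_ : Int) => PySem.Set.empty) PySem.Dict.empty
  rw [pvInit, h, PySem.Dict.keys_empty]
  exact PySem.Set.ofList_eq_self_of_nodup _ (PySem.List.nodup_pyRange_one 0 81)

theorem getD_pvInit (k : Int) : pvInit.getD k PySem.Set.empty = PySem.Set.empty := by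
  have main : ∀ (l : List Int) (d : PySem.Dict Int (PySem.Set Int)),
      (∀ k', d.getD k' PySem.Set.empty = PySem.Set.empty) →
      (l.foldl (fun d x => d.insert x PySem.Set.empty) d).getD k PySem.Set.empty =
        PySem.Set.empty := by
    intro l
    induction l with
    | nil => intro d h; exact h k
    | cons x l ih =>
      intro d h
      simp only [List.foldl_cons]
      refine ih _ (fun k' => ?_)
      rw [PySem.Dict.getD_insert]
      split
      · rfl
      · exact h k'
  exact main _ _ (fun k' => PySem.Dict.getD_empty k' PySem.Set.empty)

-- ---- B side: set algebra for add / discard ----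
theorem pvAdd_discard_ne (s : PySem.Set Int) (a k : Int) (hak : a ≠ k) :
    (s.add a).discard k = (s.discard k).add a := by
  by_cases hm : a ∈ s
  · have hm' : a ∈ s.discard k := (PySem.Set.mem_discard s k a).mpr ⟨hm, hak⟩
    simp [PySem.Set.add, hm, hm']
  · have hm' : a ∉ s.discard k := fun h => hm ((PySem.Set.mem_discard s k a).mp h).1
    simp [PySem.Set.add, hm, PySem.Set.discard, List.filter_append, hak]

theorem pvAdd_discard_self (s : PySem.Set Int) (k : Int) :
    (s.add k).discard k = s.discard k := by
  by_cases hm : k ∈ s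
  · simp [PySem.Set.add, hm]
  · simp [PySem.Set.add, hm, PySem.Set.discard, List.filter_append]

-- union of a box, seen through discard, is A's guarded elementwise add
theorem pvUpdate_discard (box : List Int) (k : Int) (s : PySem.Set Int) :
    (PySem.Set.update s box).discard k = pvAddAll (s.discard k) box k := by
  induction box generalizing s with
  | nil => rfl
  | cons a l ih =>
    simp only [PySem.Set.update, List.foldl_cons, pvAddAll] at *
    by_cases hak : a ≠ k
    · rw [ih, pvAdd_discard_ne s a k hak, if_pos hak]
    · rw [not_not] at hak
      subst hak
      rw [ih, pvAdd_discard_self]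
      simp

theorem pvFoldUpdate_discard (L : List (List Int)) (k : Int) (s : PySem.Set Int) :
    (L.foldl (fun s box => PySem.Set.update s box) s).discard k =
      L.foldl (fun s box => pvAddAll s box k) (s.discard k) := by
  induction L generalizing s with
  | nil => rfl
  | cons box L ih =>
    simp only [List.foldl_cons]
    rw [ih, pvUpdate_discard]

-- repeated pvAddAll with the same box collapses (idempotence)
theorem pvRepFix (box : List Int) (k : Int) (m : Nat) (t : PySem.Set Int)
    (ht : pvAddAll t box k = t) :
    (List.replicate m box).foldl (fun s b => pvAddAll s b k) t = t := by
  induction m with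
  | zero => rfl
  | succ m ih => simp only [List.replicate_succ, List.foldl_cons, ht]; exact ih

-- the per-position box list (with multiplicities) folds to A's per-position value
def pvFlat (boxes : List (List Int)) (k : Int) : List (List Int) :=
  boxes.flatMap (fun box => List.replicate (box.count k) box)

theorem pvFoldFlat (boxes : List (List Int)) (k : Int) (t : PySem.Set Int) :
    (pvFlat boxes k).foldl (fun s b => pvAddAll s b k) t = pvVal boxes k t := by
  induction boxes generalizing t with
  | nil => rfl
  | cons box bs ih =>
    simp only [pvFlat, pvVal, List.flatMap_cons, List.foldl_append, List.foldl_cons] at *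
    by_cases hm : k ∈ box
    · obtain ⟨m, hc⟩ : ∃ m, box.count k = m + 1 :=
        ⟨box.count k - 1, (Nat.succ_pred_eq_of_pos (List.count_pos_iff.mpr hm)).symm⟩
      rw [hc, List.replicate_succ, List.foldl_cons,
        pvRepFix box k m _ (pvAddAll_idem box k t), if_pos hm]
      exact ih _
    · rw [List.count_eq_zero_of_not_mem hm, List.replicate_zero, List.foldl_nil, if_neg hm]
      exact ih t

-- ---- B side: the member -> boxes index ----
theorem getD_boxIndexInner (l box : List Int) (d : PySem.Dict Int (List (List Int)))
    (k : Int) (hk : 0 ≤ k ∧ k < 81) :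
    (l.foldl (fun d i =>
        if 0 ≤ i ∧ i < 81 then d.modify i [] (fun bs => bs ++ [box]) else d) d).getD k [] =
      d.getD k [] ++ List.replicate (l.count k) box := by
  induction l generalizing d with
  | nil => simp
  | cons i l ih =>
    simp only [List.foldl_cons]
    by_cases hi : 0 ≤ i ∧ i < 81
    · rw [if_pos hi, ih, PySem.Dict.getD_modify]
      by_cases hki : k = i
      · subst hki
        simp [List.replicate_succ, List.append_assoc]
      · rw [if_neg hki]
        simp [Ne.symm hki]
    · have hik : i ≠ k := fun h => hi (h ▸ hk)
      rw [if_neg hi, ih]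
      simp [hik]

theorem getD_boxIndex (boxes : List (List Int)) (d : PySem.Dict Int (List (List Int)))
    (k : Int) (hk : 0 ≤ k ∧ k < 81) :
    (boxes.foldl (fun d box =>
        box.foldl (fun d i =>
          if 0 ≤ i ∧ i < 81 then d.modify i [] (fun bs => bs ++ [box]) else d) d) d).getD k [] =
      d.getD k [] ++ pvFlat boxes k := by
  induction boxes generalizing d with
  | nil => simp [pvFlat]
  | cons box bs ih =>
    simp only [List.foldl_cons, pvFlat, List.flatMap_cons] at *
    rw [ih, getD_boxIndexInner _ _ _ _ hk, List.append_assoc]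

-- ---- B side: the final table ----
theorem getD_tableFold (l : List Int) (g : Int → PySem.Set Int)
    (d : PySem.Dict Int (PySem.Set Int)) (k : Int) :
    (l.foldl (fun t i => t.insert i (g i)) d).getD k PySem.Set.empty =
      if k ∈ l then g k else d.getD k PySem.Set.empty := by
  induction l generalizing d with
  | nil => simp
  | cons i l ih =>
    simp only [List.foldl_cons]
    rw [ih, PySem.Dict.getD_insert]
    by_cases hkl : k ∈ l
    · simp [hkl, List.mem_cons]
    · by_cases hk : k = i <;> simp [hkl, hk, List.mem_cons]

theorem keys_tableFold (l : List Int) (g : Int → PySem.Set Int) (hnd : l.Nodup) :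
    ((l.foldl (fun t i => t.insert i (g i)) PySem.Dict.empty) :
        PySem.Dict Int (PySem.Set Int)).keys = l := by
  have h := PySem.Dict.keys_foldl_insert l
    (fun (t : PySem.Dict Int (PySem.Set Int)) (i : Int) => g i) PySem.Dict.empty
  rw [h, PySem.Dict.keys_empty]
  exact PySem.Set.ofList_eq_self_of_nodup _ hnd

-- ===== VERDICT (by name: the statement is the Claim_ definition above) =====
theorem sudoku_neighbors_spec : Claim_equal_sudoku_neighbors := by
  intro csp_table _
  show sudoku_neighbors csp_table = sudoku_neighbors_alt csp_table
  have eA : sudoku_neighbors csp_table =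
      ((PySem.List.pyRange 0 81 1).foldl (pvStepA csp_table) pvInit).items := rfl
  set boxes_of : PySem.Dict Int (List (List Int)) :=
    csp_table.foldl (fun d box =>
      box.foldl (fun d i =>
        if 0 ≤ i ∧ i < 81 then d.modify i [] (fun bs => bs ++ [box]) else d) d)
      PySem.Dict.empty with hboxes_of
  set g : Int → PySem.Set Int := fun i =>
    PySem.Set.discard
      ((boxes_of.getD i []).foldl (fun s box => PySem.Set.update s box) PySem.Set.empty) i
    with hg
  have eB : sudoku_neighbors_alt csp_table =
      ((PySem.List.pyRange 0 81 1).foldl (fun t i => t.insert i (g i))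
        PySem.Dict.empty).items := rfl
  rw [eA, eB]
  have hcInit : ∀ j ∈ PySem.List.pyRange 0 81 1, pvInit.contains j = true := by
    intro j hj
    exact (PySem.Dict.contains_iff_mem_keys pvInit j).mpr (keys_pvInit ▸ hj)
  have hnd := PySem.List.nodup_pyRange_one 0 81
  -- B's per-position value is A's per-position value
  have hgVal : ∀ k, 0 ≤ k ∧ k < 81 → g k = pvVal csp_table k PySem.Set.empty := by
    intro k hk
    rw [hg]
    show PySem.Set.discard _ k = _
    rw [hboxes_of, getD_boxIndex _ _ _ hk, PySem.Dict.getD_empty, List.nil_append,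
      pvFoldUpdate_discard]
    have hempty : (PySem.Set.empty : PySem.Set Int).discard k = PySem.Set.empty := rfl
    rw [hempty, pvFoldFlat]
  have hA : ∀ k, ((PySem.List.pyRange 0 81 1).foldl (pvStepA csp_table) pvInit).getD k
      PySem.Set.empty =
      if k ∈ PySem.List.pyRange 0 81 1 then pvVal csp_table k PySem.Set.empty
      else PySem.Set.empty := by
    intro k
    rw [getD_foldA _ _ _ _ hnd hcInit, getD_pvInit]
  have hB : ∀ k, k ∈ PySem.List.pyRange 0 81 1 →
      ((PySem.List.pyRange 0 81 1).foldl (fun t i => t.insert i (g i))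
        PySem.Dict.empty).getD k PySem.Set.empty = g k := by
    intro k hkmem
    rw [getD_tableFold, if_pos hkmem]
  have hkA : ((PySem.List.pyRange 0 81 1).foldl (pvStepA csp_table) pvInit).keys =
      PySem.List.pyRange 0 81 1 := by
    rw [keys_foldA _ _ _ hcInit, keys_pvInit]
  have hkB : ((PySem.List.pyRange 0 81 1).foldl (fun t i => t.insert i (g i))
      PySem.Dict.empty).keys = PySem.List.pyRange 0 81 1 := keys_tableFold _ _ hnd
  rw [PySem.Dict.items_eq_map_keys _ (by rw [hkA]; exact hnd) PySem.Set.empty,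
    PySem.Dict.items_eq_map_keys _ (by rw [hkB]; exact hnd) PySem.Set.empty,
    hkA, hkB]
  refine List.map_congr_left (fun k hkmem => ?_)
  rw [hA, hB k hkmem, if_pos hkmem, hgVal k ((PySem.List.mem_pyRange_one).mp hkmem)]
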